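-- pv_equiv track=rewrite | github.com/ansible/awx | awx/lib/site-packages/os_client_config/config.py | _auth_update
-- ===== SOURCE A (Python) =====
-- def _auth_update(old_dict, new_dict):
--     """Like dict.update, except handling the nested dict called auth."""
--     for (k, v) in new_dict.items():
--         if k == 'auth':
--             if k in old_dict:
--                 old_dict[k].update(v)
--             else:
--                 old_dict[k] = v.copy()
--         else:
--             old_dict[k] = v
--     return old_dict
-- ===== SOURCE B (Python) =====
-- def _auth_update(old_dict, new_dict):
--     """Rebuild the merged dict key-directed: resolve every existing key of
--     old_dict against new_dict in one pass, then append the brand-new keys of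
--     new_dict.  (Returns a fresh dict; it does not mutate old_dict in place.)"""
--     merged = {}
--     for k, v in old_dict.items():
--         if k in new_dict:
--             nv = new_dict[k]
--             merged[k] = {**v, **nv} if k == 'auth' else nv
--         else:
--             merged[k] = v
--     for k, v in new_dict.items():
--         if k not in merged:
--             merged[k] = v.copy() if k == 'auth' else v
--     return merged
-- ===== Notes on version B (the rewrite author's own statement) =====
-- stated objective: alternative
-- what changed: A folds over new_dict mutating old_dict branch-by-branch; B rebuilds the result key-directed: one pass over old_dict resolving each key against new_dict (with the nested auth merge done per-key), then one pass appending the brand-new keys of new_dict.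
import Mathlib
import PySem

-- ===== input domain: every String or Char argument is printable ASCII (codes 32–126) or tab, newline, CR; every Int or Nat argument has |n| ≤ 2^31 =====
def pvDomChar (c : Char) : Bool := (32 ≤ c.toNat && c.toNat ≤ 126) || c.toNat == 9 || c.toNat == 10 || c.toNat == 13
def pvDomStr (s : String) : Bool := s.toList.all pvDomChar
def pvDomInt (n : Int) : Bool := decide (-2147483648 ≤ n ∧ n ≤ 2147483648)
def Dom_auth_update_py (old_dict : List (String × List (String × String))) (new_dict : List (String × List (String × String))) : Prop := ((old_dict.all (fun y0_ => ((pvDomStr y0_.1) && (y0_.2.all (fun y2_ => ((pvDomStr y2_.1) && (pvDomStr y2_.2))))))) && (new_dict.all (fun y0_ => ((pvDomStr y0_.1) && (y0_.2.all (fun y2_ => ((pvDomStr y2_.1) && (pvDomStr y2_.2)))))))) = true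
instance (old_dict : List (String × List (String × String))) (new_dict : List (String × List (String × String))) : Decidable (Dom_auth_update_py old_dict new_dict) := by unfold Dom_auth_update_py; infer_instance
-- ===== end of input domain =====

-- B rebuilds the merged dict key-directed (each old key resolved against new_dict, then the fresh new
-- keys appended) instead of A's single mutating fold over new_dict; the equivalence is about the
-- RETURN value only — Python A mutates old_dict in place, Python B returns a fresh dict.

-- ===== PORT A =====
-- nested 'dict.update' on the auth value: base's items overwritten in place by v, new keys appended
def pvAuthMerge (base : List (String × String)) (v : List (String × String)) : List (String × String) :=
  ((PySem.Dict.mk base).update v).items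

-- loop body of A's 'for (k, v) in new_dict.items()'
def pvStepA (od : PySem.Dict String (List (String × String))) (kv : String × List (String × String)) : PySem.Dict String (List (String × String)) :=
  if kv.1 == "auth" then
    if od.contains kv.1 then
      od.insert kv.1 (pvAuthMerge (od.getD kv.1 []) kv.2)  -- old_dict[k].update(v)
    else
      od.insert kv.1 kv.2                                  -- old_dict[k] = v.copy() (the copy of a value list is the same list)
  else
    od.insert kv.1 kv.2                                    -- old_dict[k] = v

def auth_update_py (old_dict : List (String × List (String × String))) (new_dict : List (String × List (String × String))) : List (String × List (String × String)) :=
  (new_dict.foldl pvStepA (PySem.Dict.mk old_dict)).items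

-- ===== PORT B =====
-- first loop body of B: merged[k] = the value of an old key k resolved against new_dict
def pvStepB1 (nd : PySem.Dict String (List (String × String))) (m : PySem.Dict String (List (String × String))) (kv : String × List (String × String)) : PySem.Dict String (List (String × String)) :=
  match nd.get? kv.1 with
  | some nv => m.insert kv.1 (if kv.1 == "auth" then pvAuthMerge kv.2 nv else nv)  -- {**v, **nv} / nv
  | none => m.insert kv.1 kv.2

-- second loop body of B: append the keys of new_dict not yet in merged
def pvStepB2 (m : PySem.Dict String (List (String × String))) (kv : String × List (String × String)) : PySem.Dict String (List (String × String)) :=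
  if m.contains kv.1 then m
  else m.insert kv.1 kv.2                                  -- v.copy() for a fresh auth key is the same value list

def auth_update_py_alt (old_dict : List (String × List (String × String))) (new_dict : List (String × List (String × String))) : List (String × List (String × String)) :=
  let nd := PySem.Dict.mk new_dict
  let m1 := old_dict.foldl (pvStepB1 nd) PySem.Dict.empty
  (new_dict.foldl pvStepB2 m1).items

-- ===== PRECONDITION & SPEC =====
-- Pre_ excludes association lists with duplicate keys: a Python dict cannot hold duplicate keys, so
-- such lists represent no input the Python programs ever receive.
def Pre_auth_update_py (old_dict : List (String × List (String × String))) (new_dict : List (String × List (String × String))) : Prop :=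
  (old_dict.map Prod.fst).Nodup ∧ (new_dict.map Prod.fst).Nodup
instance (old_dict : List (String × List (String × String))) (new_dict : List (String × List (String × String))) : Decidable (Pre_auth_update_py old_dict new_dict) := by unfold Pre_auth_update_py; infer_instance

def pvWitness_auth_update_py : (List (String × List (String × String))) × (List (String × List (String × String))) :=
  ([("auth", [("x", "1")]), ("region", [("r", "a")])], [("auth", [("y", "2")]), ("cloud", [])])

def Spec_auth_update_py (old_dict : List (String × List (String × String))) (new_dict : List (String × List (String × String))) (out : List (String × List (String × String))) : Prop := out = auth_update_py_alt old_dict new_dict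
instance (old_dict : List (String × List (String × String))) (new_dict : List (String × List (String × String))) (out : List (String × List (String × String))) : Decidable (Spec_auth_update_py old_dict new_dict out) := by unfold Spec_auth_update_py; infer_instance

-- ===== CLAIM (what is proved, stated in full; the proofs are below) =====
def Claim_equal_auth_update_py : Prop := ∀ (old_dict : List (String × List (String × String))) (new_dict : List (String × List (String × String))), Dom_auth_update_py old_dict new_dict → Pre_auth_update_py old_dict new_dict → Spec_auth_update_py old_dict new_dict (auth_update_py old_dict new_dict)

-- ===== LEMMAS AND PROOFS =====

-- the value an entry (k, v) of old_dict ends up with after the merge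
def pvResolve (new_dict : List (String × List (String × String))) (k : String) (v : List (String × String)) : List (String × String) :=
  match (PySem.Dict.mk new_dict).get? k with
  | some nv => if k == "auth" then pvAuthMerge v nv else nv
  | none => v

lemma pvStepA_eq (od : PySem.Dict String (List (String × String))) (kv : String × List (String × String)) :
    pvStepA od kv = od.insert kv.1 (if kv.1 == "auth" && od.contains kv.1 then pvAuthMerge (od.getD kv.1 []) kv.2 else kv.2) := by
  unfold pvStepA
  by_cases h1 : kv.1 == "auth" <;> by_cases h2 : od.contains kv.1 <;> simp_all

lemma pvResolve_not_mem (new_dict : List (String × List (String × String))) (k : String) (v : List (String × String))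
    (h : k ∉ new_dict.map Prod.fst) : pvResolve new_dict k v = v := by
  unfold pvResolve
  have : (PySem.Dict.mk new_dict).get? k = none := by
    rw [PySem.Dict.get?_eq_none_iff_not_mem_keys]; simpa using h
  rw [this]

-- A's fold in normal form: old entries pointwise resolved, fresh new entries appended
lemma pvFoldA (new_dict : List (String × List (String × String))) (d : PySem.Dict String (List (String × String)))
    (hd : d.keys.Nodup) (hn : (new_dict.map Prod.fst).Nodup) :
    (new_dict.foldl pvStepA d).items =
      d.items.map (fun p => (p.1, pvResolve new_dict p.1 p.2)) ++ new_dict.filter (fun q => !(d.contains q.1)) := by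
  induction new_dict generalizing d with
  | nil =>
    simp [pvResolve, PySem.Dict.get?]
  | cons kv rest ih =>
    obtain ⟨k, v⟩ := kv
    simp only [List.map_cons, List.nodup_cons] at hn
    obtain ⟨hk, hrest⟩ := hn
    simp only [List.foldl_cons, pvStepA_eq]
    by_cases h : d.contains k
    · rw [ih (d.insert k (if (k == "auth") && d.contains k then pvAuthMerge (d.getD k []) v else v))
          (by rw [PySem.Dict.keys_insert_of_contains _ _ h]; exact hd) hrest]
      rw [PySem.Dict.items_insert_of_contains _ _ h]
      rw [List.map_map]
      congr 1
      · apply List.map_congr_left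
        intro p hp
        by_cases hpk : p.1 = k
        · have hmem : (k, p.2) ∈ d.items := by rw [← hpk]; exact hp
          have hgd : d.getD k [] = p.2 := PySem.Dict.getD_of_mem_items _ hmem hd []
          simp only [Function.comp_apply, hpk, beq_self_eq_true, if_pos]
          have hres : pvResolve rest k (if (k == "auth") && d.contains k then pvAuthMerge (d.getD k []) v else v)
              = (if (k == "auth") && d.contains k then pvAuthMerge (d.getD k []) v else v) :=
            pvResolve_not_mem _ _ _ hk
          simp only [hres]
          unfold pvResolve
          rw [PySem.Dict.get?_mk_cons]
          simp [h, hgd]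
        · simp only [Function.comp_apply]
          have : (p.1 == k) = false := by simp [hpk]
          simp only [this, Bool.false_eq_true, if_false]
          unfold pvResolve
          rw [PySem.Dict.get?_mk_cons]
          have : (k == p.1) = false := by simp; exact fun e => hpk (Eq.symm e)
          simp [this]
      · rw [List.filter_cons]
        simp only [h, Bool.not_true, Bool.false_eq_true, if_false]
        apply List.filter_congr
        intro q hq
        have hqk : q.1 ≠ k := fun e => hk (e ▸ List.mem_map_of_mem hq)
        rw [PySem.Dict.contains_insert]
        simp [hqk]
    · have hwv : (if (k == "auth") && d.contains k then pvAuthMerge (d.getD k []) v else v) = v := by simp [h]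
      rw [hwv]
      have hknotin : k ∉ d.keys := by
        intro hmem
        exact absurd ((PySem.Dict.contains_iff_mem_keys d k).2 hmem) (by simp [h])
      rw [ih (d.insert k v)
          (by rw [PySem.Dict.keys_insert_of_not_contains _ _ (by simpa using h)]
              exact List.Nodup.append hd (List.nodup_singleton k) (by simpa using hknotin)) hrest]
      rw [PySem.Dict.items_insert_of_not_contains _ _ (by simpa using h)]
      rw [List.map_append]
      have h1 : rest.filter (fun q => !(d.insert k v).contains q.1) = rest.filter (fun q => !(d.contains q.1)) := by
        apply List.filter_congr
        intro q hq
        have hqk : q.1 ≠ k := fun e => hk (e ▸ List.mem_map_of_mem hq)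
        rw [PySem.Dict.contains_insert]
        simp [hqk]
      have h2 : List.map (fun p => (p.1, pvResolve rest p.1 p.2)) d.items
          = List.map (fun p => (p.1, pvResolve ((k, v) :: rest) p.1 p.2)) d.items := by
        apply List.map_congr_left
        intro p hp
        have hpk : p.1 ≠ k := fun e => hknotin (e ▸ PySem.Dict.mem_keys_of_mem_items _ hp)
        unfold pvResolve
        rw [PySem.Dict.get?_mk_cons]
        have : (k == p.1) = false := by simp; exact fun e => hpk (Eq.symm e)
        simp [this]
      have h3 : pvResolve rest k v = v := pvResolve_not_mem _ _ _ hk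
      rw [h1, h2, List.filter_cons]
      have : (!d.contains k) = true := by simp [h]
      simp only [this, if_pos]
      rw [List.map_singleton, h3]
      simp

lemma pvStepB1_eq (nd m : PySem.Dict String (List (String × String))) (new_dict : List (String × List (String × String)))
    (hnd : nd = PySem.Dict.mk new_dict) (kv : String × List (String × String)) :
    pvStepB1 nd m kv = m.insert kv.1 (pvResolve new_dict kv.1 kv.2) := by
  subst hnd
  unfold pvStepB1 pvResolve
  cases (PySem.Dict.mk new_dict).get? kv.1 <;> rfl

-- B's first loop: fresh distinct inserts into an empty dict, i.e. a map over old_dict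
lemma pvFoldB1 (new_dict old_dict : List (String × List (String × String)))
    (ho : (old_dict.map Prod.fst).Nodup) :
    (old_dict.foldl (pvStepB1 (PySem.Dict.mk new_dict)) PySem.Dict.empty).items =
      old_dict.map (fun p => (p.1, pvResolve new_dict p.1 p.2)) := by
  have hfun : pvStepB1 (PySem.Dict.mk new_dict) =
      fun m kv => m.insert kv.1 (pvResolve new_dict kv.1 kv.2) := by
    funext m kv; exact pvStepB1_eq _ _ _ rfl kv
  rw [hfun]
  have := PySem.Dict.items_foldl_insert_fresh old_dict (fun kv => kv.1)
    (fun kv => pvResolve new_dict kv.1 kv.2) PySem.Dict.empty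
    (fun a _ => PySem.Dict.contains_empty a.1) (by simpa using ho)
  simpa using this

-- B's second loop: appends exactly the entries of new_dict whose key m does not contain
lemma pvFoldB2 (new_dict : List (String × List (String × String))) (m : PySem.Dict String (List (String × String)))
    (hn : (new_dict.map Prod.fst).Nodup) :
    (new_dict.foldl pvStepB2 m).items = m.items ++ new_dict.filter (fun q => !(m.contains q.1)) := by
  induction new_dict generalizing m with
  | nil => simp
  | cons kv rest ih =>
    simp only [List.map_cons, List.nodup_cons] at hn
    obtain ⟨hk, hrest⟩ := hn
    simp only [List.foldl_cons, List.filter_cons]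
    by_cases h : m.contains kv.1
    · have : pvStepB2 m kv = m := by unfold pvStepB2; simp [h]
      rw [this, ih m hrest]
      simp [h]
    · have hstep : pvStepB2 m kv = m.insert kv.1 kv.2 := by unfold pvStepB2; simp [h]
      rw [hstep, ih _ hrest]
      rw [PySem.Dict.items_insert_of_not_contains _ _ (by simpa using h)]
      have h1 : rest.filter (fun q => !(m.insert kv.1 kv.2).contains q.1)
          = rest.filter (fun q => !(m.contains q.1)) := by
        apply List.filter_congr
        intro q hq
        have hqk : q.1 ≠ kv.1 := fun e => hk (e ▸ List.mem_map_of_mem hq)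
        rw [PySem.Dict.contains_insert]
        simp [hqk]
      rw [h1]
      have : (!m.contains kv.1) = true := by simp [h]
      simp [this]

-- ===== VERDICT (by name: the statement is the Claim_ definition above) =====
theorem auth_update_py_spec : Claim_equal_auth_update_py := by
  intro old_dict new_dict _ hpre
  unfold Spec_auth_update_py auth_update_py auth_update_py_alt
  rw [pvFoldA new_dict (PySem.Dict.mk old_dict) (by simpa [PySem.Dict.keys] using hpre.1) hpre.2]
  rw [pvFoldB2 new_dict _ hpre.2, pvFoldB1 new_dict old_dict hpre.1]
  congr 1
  apply List.filter_congr
  intro q _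
  have hkeys : (old_dict.foldl (pvStepB1 (PySem.Dict.mk new_dict)) PySem.Dict.empty).keys
      = old_dict.map Prod.fst := by
    simp only [PySem.Dict.keys]
    rw [pvFoldB1 new_dict old_dict hpre.1, List.map_map]
    rfl
  rw [PySem.Dict.contains_eq_decide_mem_keys, PySem.Dict.contains_eq_decide_mem_keys, hkeys]
  simp [PySem.Dict.keys]
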